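-- pv_equiv track=rewrite | github.com/Bictole/Advent-of-Code | 2021/1/1.py | count_three_increase
-- ===== SOURCE A (Python) =====
-- def count_three_increase(lines):
--
--     result = 0
--
--     for i in range(len(lines) - 3):
--         first = int(lines[i]) + int(lines[i + 1]) + int(lines[i + 2])
--         second = int(lines[i + 1]) + int(lines[i + 2]) + int(lines[i + 3])
--
--         if (first < second):
--             result += 1
--
--     return result
-- ===== SOURCE B (Python) =====
-- def count_three_increase(lines):
--     # Telescoping: consecutive 3-window sums share two middle terms, so the
--     # comparison reduces to comparing the elements three apart.
--     return sum(1 for a, b in zip(lines, lines[3:]) if int(a) < int(b))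
-- ===== Notes on version B (the rewrite author's own statement) =====
-- stated objective: simpler
-- what changed: B parses the lines once and, using the telescoping identity that consecutive 3-window sums share two terms, counts pairs three apart with nums[i] < nums[i+3], instead of A's fused loop recomputing two 3-element sums per index.
import Mathlib
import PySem

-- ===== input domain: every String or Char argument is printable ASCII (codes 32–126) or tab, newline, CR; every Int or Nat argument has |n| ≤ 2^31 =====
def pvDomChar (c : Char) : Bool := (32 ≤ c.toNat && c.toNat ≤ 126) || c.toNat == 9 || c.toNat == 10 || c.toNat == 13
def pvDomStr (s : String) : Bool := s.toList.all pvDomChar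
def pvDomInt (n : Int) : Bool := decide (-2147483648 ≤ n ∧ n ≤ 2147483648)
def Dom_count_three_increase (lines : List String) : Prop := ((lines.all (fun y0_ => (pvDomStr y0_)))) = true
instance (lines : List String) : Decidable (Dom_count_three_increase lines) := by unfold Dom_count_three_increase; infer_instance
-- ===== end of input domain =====

-- B replaces A's fused loop over two recomputed 3-element window sums by a single
-- zip pass comparing elements three apart (the windows share their two middle terms): simpler.


-- shared helper: int(s) with a default (Pre_ guarantees the parse succeeds wherever it is used)
def pvInt (s : String) : Int := (PySem.Int.ofStr? s).getD 0

-- ===== PORT A =====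
def count_three_increase (lines : List String) : Int :=
  (PySem.List.pyRange 0 ((lines.length : Int) - 3) 1).foldl
    (fun result i =>
      let first := pvInt (PySem.List.pyGetD lines i "") + pvInt (PySem.List.pyGetD lines (i + 1) "")
        + pvInt (PySem.List.pyGetD lines (i + 2) "")
      let second := pvInt (PySem.List.pyGetD lines (i + 1) "") + pvInt (PySem.List.pyGetD lines (i + 2) "")
        + pvInt (PySem.List.pyGetD lines (i + 3) "")
      if first < second then result + 1 else result) 0

-- ===== PORT B =====
def count_three_increase_alt (lines : List String) : Int :=
  (lines.zip (lines.drop 3)).foldl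
    (fun acc p => if pvInt p.1 < pvInt p.2 then acc + 1 else acc) 0

-- ===== PRECONDITION & SPEC =====
-- Pre_ excludes exactly the inputs where A raises ValueError: a list of length ≥ 4
-- containing a string int() cannot parse (if length ≤ 3 A's loop is empty and A returns 0).
def Pre_count_three_increase (lines : List String) : Prop :=
  lines.length ≤ 3 ∨ ∀ s ∈ lines, (PySem.Int.ofStr? s).isSome = true
instance (lines : List String) : Decidable (Pre_count_three_increase lines) := by
  unfold Pre_count_three_increase; infer_instance
def pvWitness_count_three_increase : List String := ["1", "2", "0", "5", "3"]

def Spec_count_three_increase (lines : List String) (out : Int) : Prop := out = count_three_increase_alt lines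
instance (lines : List String) (out : Int) : Decidable (Spec_count_three_increase lines out) := by unfold Spec_count_three_increase; infer_instance

-- ===== CLAIM (what is proved, stated in full; the proofs are below) =====
def Claim_equal_count_three_increase : Prop := ∀ (lines : List String), Dom_count_three_increase lines → Pre_count_three_increase lines → Spec_count_three_increase lines (count_three_increase lines)

-- ===== LEMMAS AND PROOFS =====

-- the zip list is the table of pairs three apart, indexed by range (n - 3)
lemma zip_drop_three_eq_map_range (lines : List String) :
    lines.zip (lines.drop 3) =
      (List.range (lines.length - 3)).map
        (fun k => (lines.getD k "", lines.getD (k + 3) "")) := by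
  apply List.ext_getElem
  · simp only [List.length_zip, List.length_drop, List.length_map, List.length_range]; omega
  · intro k h1 h2
    simp only [List.length_zip, List.length_drop] at h1
    have hk : k < lines.length - 3 := by omega
    simp [List.getElem_zip, List.getElem_map, List.getElem_range,
      List.getD_eq_getElem?_getD, List.getElem?_eq_getElem (by omega : k < lines.length),
      List.getElem?_eq_getElem (by omega : k + 3 < lines.length), List.getElem_drop]
    congr 1
    omega

theorem count_three_increase_spec : Claim_equal_count_three_increase := by
  intro lines _hdom _hpre
  unfold Spec_count_three_increase count_three_increase count_three_increase_alt
  rw [PySem.List.pyRange_one, PySem.List.foldl_ite_add_one, zip_drop_three_eq_map_range,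
    PySem.List.foldl_ite_add_one]
  congr 1
  rw [List.countP_map, List.countP_map]
  have h3 : ((lines.length : Int) - 3 - 0).toNat = lines.length - 3 := by omega
  rw [h3]
  congr 1
  apply List.countP_congr
  intro k hk
  have hk' : k < lines.length - 3 := List.mem_range.mp hk
  have c1 : (k : Int) + 1 = ((k + 1 : Nat) : Int) := by push_cast; ring
  have c2 : (k : Int) + 2 = ((k + 2 : Nat) : Int) := by push_cast; ring
  have c3 : (k : Int) + 3 = ((k + 3 : Nat) : Int) := by push_cast; ring
  simp only [Function.comp, Int.zero_add, c1, c2, c3, PySem.List.pyGetD_natCast,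
    decide_eq_true_eq]
  omega
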